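-- pv_equiv track=rewrite | github.com/OwenBC/CSC-370-assignments | a1/decompose.py | valid3nf
-- ===== SOURCE A (Python) =====
-- def powerset(s):
--     x = len(s)
--     masks = [1 << i for i in range(x)]
--     for i in range(1, (1 << x)-1):
--         yield [ss for mask, ss in zip(masks, s) if i & mask]
--
-- def getKeys(R, F):
--     superkeys = []
--     for ss in powerset(R):
--         if R == getClosure(set(ss), F):
--             superkeys.append(set(ss))
--     keys = []
--     for sk in superkeys:
--         if len([k for k in superkeys if k.issubset(sk) and k != sk]) == 0:
--             keys.append(sk)
--     return keys
--
-- def getClosure(f, F):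
--     determines = f
--     updated = True
--     while updated:
--         updated = False
--         for dependency in F:
--             if len(dependency[0] - (determines & dependency[0])) == 0 and determines != determines | dependency[1]:
--                 determines = determines | dependency[1]
--                 updated = True
--     return determines
--
-- def valid3nf(R, F):
--     keys = getKeys(R, F)
--     for f in F:
--         violation = True
--         for k in keys:
--             if k.issubset(f[0]) or f[1].issubset(k):
--                 violation = False
--         if violation:
--             return False
--     return True
-- ===== SOURCE B (Python) =====
-- # B: same subset enumeration, but the attribute closure is computed by an
-- # attribute-driven worklist over an attribute->FD index (each FD re-examined only
-- # when one of its LHS attributes is first reached) instead of repeated full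
-- # fixpoint passes over F, and the superkey/key/3NF steps are comprehensions.
--
-- def _closure(seed, F, index):
--     result = set(seed)
--     stack = list(result)
--     for lhs, rhs in F:
--         if not lhs:
--             for b in rhs:
--                 if b not in result:
--                     result.add(b)
--                     stack.append(b)
--     while stack:
--         a = stack.pop()
--         for lhs, rhs in index.get(a, ()):
--             if lhs <= result:
--                 for b in rhs:
--                     if b not in result:
--                         result.add(b)
--                         stack.append(b)
--     return result
--
--
-- def valid3nf(R, F):
--     target = set(R)
--     index = {}
--     for lhs, rhs in F:
--         for a in lhs:
--             index.setdefault(a, []).append((lhs, rhs))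
--     Rl = list(R)
--     n = len(Rl)
--     masks = [1 << i for i in range(n)]
--     subsets = [[a for mask, a in zip(masks, Rl) if m & mask]
--                for m in range(1, (1 << n) - 1)]
--     superkeys = [set(ss) for ss in subsets if target == _closure(set(ss), F, index)]
--     keys = [sk for sk in superkeys if not any(k < sk for k in superkeys)]
--     return all(any(k <= lhs or rhs <= k for k in keys) for lhs, rhs in F)
-- ===== Notes on version B (the rewrite author's own statement) =====
-- stated objective: alternative
-- what changed: getClosure's repeated full fixpoint passes over F are replaced by an attribute-driven worklist closure over an attribute-to-FD index built once per call (each FD is re-examined only when one of its LHS attributes is popped), and the superkey/key/3NF steps become comprehensions instead of accumulator loops; the subset enumeration is kept as in A.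
import Mathlib
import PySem

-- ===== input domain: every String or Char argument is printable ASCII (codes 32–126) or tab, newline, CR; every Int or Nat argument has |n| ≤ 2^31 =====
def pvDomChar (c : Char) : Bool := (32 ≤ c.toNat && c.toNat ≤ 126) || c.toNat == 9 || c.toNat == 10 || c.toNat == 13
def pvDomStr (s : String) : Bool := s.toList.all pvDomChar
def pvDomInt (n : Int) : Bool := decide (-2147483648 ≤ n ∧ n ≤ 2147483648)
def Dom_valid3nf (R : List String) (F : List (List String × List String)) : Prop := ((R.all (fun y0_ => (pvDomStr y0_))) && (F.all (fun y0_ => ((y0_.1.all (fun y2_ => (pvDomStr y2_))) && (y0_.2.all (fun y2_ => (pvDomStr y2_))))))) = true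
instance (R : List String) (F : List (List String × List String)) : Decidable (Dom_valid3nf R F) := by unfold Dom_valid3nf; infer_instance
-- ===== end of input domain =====

-- B changes A's fixpoint-pass attribute closure into an attribute-driven worklist over an
-- attribute→FD index built once per call; the surrounding pipeline is comprehension-style.
-- Sets (Python set[str]) follow the convention: List String of distinct elements (PySem.Set).

-- ===== PORT A =====

-- powerset(s): masks, then one subset per m in range(1, (1<<x)-1)
def pvPowerset (s : List String) : List (List String) :=
  let x := s.length
  let masks : List Int := (List.range x).map (fun i => ((1 <<< i : Nat) : Int))
  (PySem.List.pyRange 1 (((1 <<< x : Nat) : Int) - 1) 1).map (fun i =>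
    ((masks.zip s).filter (fun p => PySem.Int.band i p.1 != 0)).map (fun p => p.2))

-- one 'for dependency in F' step of getClosure's while-body
def pvStepA (st : List String × Bool) (dep : List String × List String) :
    List String × Bool :=
  if PySem.Set.len (PySem.Set.diff dep.1 (PySem.Set.inter st.1 dep.1)) == 0 &&
     !(PySem.Set.equal st.1 (PySem.Set.union st.1 dep.2)) then
    (PySem.Set.union st.1 dep.2, true)
  else st

-- one full 'for dependency in F' pass (updated starts False)
def pvPassA (F : List (List String × List String)) (det : List String) :
    List String × Bool :=
  F.foldl pvStepA (det, false)

-- the 'while updated' loop; fuel only makes the recursion structural: each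
-- repeated pass strictly grows determines, so the fuel below is never exhausted
def pvLoopA (F : List (List String × List String)) : Nat → List String → List String
  | 0, det => det
  | fuel + 1, det =>
    let st := pvPassA F det
    if st.2 then pvLoopA F fuel st.1 else st.1

def pvGetClosure (f : List String) (F : List (List String × List String)) : List String :=
  pvLoopA F (f.length + (F.flatMap (fun d => d.2)).length + 1) f

def pvGetKeys (R : List String) (F : List (List String × List String)) :
    List (List String) :=
  let superkeys := (pvPowerset R).foldl (fun sks ss =>
    if PySem.Set.equal R (pvGetClosure (PySem.Set.ofList ss) F) then
      sks ++ [PySem.Set.ofList ss]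
    else sks) []
  superkeys.foldl (fun ks sk =>
    if (superkeys.filter (fun k =>
          PySem.Set.issubset k sk && !(PySem.Set.equal k sk))).length == 0 then
      ks ++ [sk]
    else ks) []

-- the 'for f in F' loop of valid3nf with its early return False
def pvCheckA (keys : List (List String)) : List (List String × List String) → Bool
  | [] => true
  | f :: rest =>
    let violation := keys.foldl (fun v k =>
      if PySem.Set.issubset k f.1 || PySem.Set.issubset f.2 k then false else v) true
    if violation then false else pvCheckA keys rest

def valid3nf (R : List String) (F : List (List String × List String)) : Bool :=
  pvCheckA (pvGetKeys R F) F

-- ===== PORT B =====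

-- index.setdefault(a, []).append((lhs, rhs)) for every a in lhs, for every FD
def pvIndexB (F : List (List String × List String)) :
    PySem.Dict String (List (List String × List String)) :=
  F.foldl (fun d dep =>
    dep.1.foldl (fun d a => d.modify a [] (fun l => l ++ [dep])) d) PySem.Dict.empty

-- 'for b in rhs: if b not in result: result.add(b); stack.append(b)' on (result, stack)
def pvFireB (st : List String × List String) (rhs : List String) :
    List String × List String :=
  rhs.foldl (fun st b =>
    if PySem.Set.contains st.1 b then st else (st.1 ++ [b], st.2 ++ [b])) st

-- body of 'for lhs, rhs in index.get(a, ())'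
def pvInnerB (st : List String × List String) (dep : List String × List String) :
    List String × List String :=
  if PySem.Set.issubset dep.1 st.1 then pvFireB st dep.2 else st

-- 'while stack: a = stack.pop(); ...' — pop takes the LAST element; fuel only
-- makes the recursion structural (each pop advances a bounded measure)
def pvLoopB (idx : PySem.Dict String (List (List String × List String))) :
    Nat → List String × List String → List String
  | 0, st => st.1
  | fuel + 1, st =>
    match st.2.getLast? with
    | none => st.1
    | some a => pvLoopB idx fuel ((idx.getD a []).foldl pvInnerB (st.1, st.2.dropLast))

-- 'for lhs, rhs in F: if not lhs: fire' (FDs with empty LHS fire unconditionally)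
def pvInitB (st : List String × List String) (dep : List String × List String) :
    List String × List String :=
  if dep.1.isEmpty then pvFireB st dep.2 else st

def pvClosureB (seed : List String) (F : List (List String × List String))
    (idx : PySem.Dict String (List (List String × List String))) : List String :=
  let result : PySem.Set String := PySem.Set.ofList seed
  let st := F.foldl pvInitB (result, result)
  pvLoopB idx (seed.length + (F.flatMap (fun d => d.2)).length + 1) st

def valid3nf_alt (R : List String) (F : List (List String × List String)) : Bool :=
  let target := PySem.Set.ofList R
  let idx := pvIndexB F
  let n := R.length
  let masks : List Int := (List.range n).map (fun i => ((1 <<< i : Nat) : Int))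
  let subsets := (PySem.List.pyRange 1 (((1 <<< n : Nat) : Int) - 1) 1).map (fun m =>
    ((masks.zip R).filter (fun p => PySem.Int.band m p.1 != 0)).map (fun p => p.2))
  let superkeys := (subsets.filter (fun ss =>
    PySem.Set.equal target (pvClosureB (PySem.Set.ofList ss) F idx))).map
      (fun ss => PySem.Set.ofList ss)
  let keys := superkeys.filter (fun sk =>
    !(superkeys.any (fun k => PySem.Set.issubset k sk && !(PySem.Set.equal k sk))))
  F.all (fun dep => keys.any (fun k =>
    PySem.Set.issubset k dep.1 || PySem.Set.issubset dep.2 k))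

-- ===== PRECONDITION & SPEC =====
def Spec_valid3nf (R : List String) (F : List (List String × List String)) (out : Bool) : Prop := out = valid3nf_alt R F
instance (R : List String) (F : List (List String × List String)) (out : Bool) : Decidable (Spec_valid3nf R F out) := by unfold Spec_valid3nf; infer_instance

-- ===== CLAIM (what is proved, stated in full; the proofs are below) =====
def Claim_equal_valid3nf : Prop := ∀ (R : List String) (F : List (List String × List String)), Dom_valid3nf R F → Spec_valid3nf R F (valid3nf R F)

-- ===== LEMMAS AND PROOFS =====

-- 'S is closed under the FDs of F'
def pvClosed (F : List (List String × List String)) (S : List String) : Prop :=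
  ∀ dep ∈ F, dep.1 ⊆ S → dep.2 ⊆ S

-- a Nodup list contained in another list is no longer than it
theorem pvNodupLenLe {l₁ l₂ : List String} (h : l₁.Nodup) (hs : l₁ ⊆ l₂) :
    l₁.length ≤ l₂.length := by
  calc l₁.length = l₁.toFinset.card := by rw [List.toFinset_card_of_nodup h]
    _ ≤ l₂.toFinset.card := Finset.card_le_card (by
        intro x hx
        rw [List.mem_toFinset] at hx ⊢
        exact hs hx)
    _ ≤ l₂.length := List.toFinset_card_le l₂

-- len(lhs - (det & lhs)) == 0  ↔  lhs ⊆ det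
theorem pvLenDiff_iff (s a : List String) :
    ((PySem.Set.len (PySem.Set.diff a (PySem.Set.inter s a)) == 0) = true) ↔ a ⊆ s := by
  simp only [PySem.Set.len, PySem.Set.diff, PySem.Set.inter, beq_iff_eq,
    Int.natCast_eq_zero, List.length_eq_zero_iff, List.filter_eq_nil_iff, List.subset_def]
  constructor
  · intro h x hx
    have := h x hx
    simp only [Bool.not_eq_true', Bool.not_eq_false, PySem.Set.contains_eq_listContains,
      List.contains_eq_mem, decide_eq_true_eq, List.mem_filter] at this
    exact this.1
  · intro h x hx
    simp only [Bool.not_eq_true', Bool.not_eq_false, PySem.Set.contains_eq_listContains,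
      List.contains_eq_mem, decide_eq_true_eq, List.mem_filter]
    exact ⟨h hx, hx⟩

-- det == det | rhs  ↔  rhs ⊆ det
theorem pvEqualUnion_iff (s t : List String) :
    (PySem.Set.equal s (PySem.Set.union s t) = true) ↔ t ⊆ s := by
  rw [PySem.Set.equal_iff]
  constructor
  · intro h x hx
    exact (h x).mpr ((PySem.Set.mem_union s t x).mpr (Or.inr hx))
  · intro h x
    rw [PySem.Set.mem_union]
    constructor
    · exact Or.inl
    · rintro (hx | hx)
      · exact hx
      · exact h hx

theorem pvStepA_fire_iff (st : List String × Bool) (dep : List String × List String) :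
    ((PySem.Set.len (PySem.Set.diff dep.1 (PySem.Set.inter st.1 dep.1)) == 0 &&
      !(PySem.Set.equal st.1 (PySem.Set.union st.1 dep.2))) = true) ↔
    (dep.1 ⊆ st.1 ∧ ¬ dep.2 ⊆ st.1) := by
  constructor
  · intro h
    rw [Bool.and_eq_true] at h
    rcases h with ⟨h1, h2⟩
    refine ⟨(pvLenDiff_iff _ _).mp h1, fun hsub => ?_⟩
    rw [(pvEqualUnion_iff _ _).mpr hsub] at h2
    simp at h2
  · rintro ⟨h1, h2⟩
    rw [Bool.and_eq_true]
    refine ⟨(pvLenDiff_iff _ _).mpr h1, ?_⟩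
    cases hq : PySem.Set.equal st.1 (PySem.Set.union st.1 dep.2)
    · rfl
    · exact absurd ((pvEqualUnion_iff _ _).mp hq) h2

theorem pvStepA_cases (st : List String × Bool) (dep : List String × List String) :
    (pvStepA st dep = st ∧ (dep.1 ⊆ st.1 → dep.2 ⊆ st.1)) ∨
    (dep.1 ⊆ st.1 ∧ ¬ dep.2 ⊆ st.1 ∧
      pvStepA st dep = (PySem.Set.union st.1 dep.2, true)) := by
  unfold pvStepA
  split
  · next h =>
    obtain ⟨h1, h2⟩ := (pvStepA_fire_iff st dep).mp h
    exact Or.inr ⟨h1, h2, rfl⟩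
  · next h =>
    refine Or.inl ⟨rfl, fun hl => ?_⟩
    by_contra hr
    exact h ((pvStepA_fire_iff st dep).mpr ⟨hl, hr⟩)

theorem pvUnion_length_lt {s t : List String} (h : ¬ t ⊆ s) :
    s.length < (PySem.Set.union s t).length := by
  rw [show PySem.Set.union s t = PySem.Set.update s t from rfl,
    PySem.Set.update_eq_append_filter s t, List.length_append]
  have h' : ∃ y, y ∈ t ∧ y ∉ s := by
    by_contra hc
    refine h fun y hy => ?_
    by_cases hys : y ∈ s
    · exact hys
    · exact absurd ⟨y, hy, hys⟩ hc
  obtain ⟨y, hy, hys⟩ := h'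
  have hmem : y ∈ (PySem.Set.ofList t).filter (fun z => !(PySem.Set.contains s z)) := by
    rw [List.mem_filter]
    refine ⟨(PySem.Set.mem_ofList t y).mpr hy, ?_⟩
    simp only [Bool.not_eq_true', PySem.Set.contains_eq_listContains, List.contains_eq_mem,
      decide_eq_false_iff_not]
    exact hys
  have := List.length_pos_of_mem hmem
  omega

theorem pvFoldA_mono (F : List (List String × List String)) :
    ∀ st : List String × Bool, st.1 ⊆ (F.foldl pvStepA st).1 := by
  induction F with
  | nil => intro st; simp
  | cons dep F ih =>
    intro st
    rw [List.foldl_cons]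
    refine List.Subset.trans ?_ (ih (pvStepA st dep))
    rcases pvStepA_cases st dep with ⟨heq, -⟩ | ⟨-, -, heq⟩
    · rw [heq]; exact List.Subset.refl _
    · rw [heq]
      intro x hx
      exact (PySem.Set.mem_union _ _ x).mpr (Or.inl hx)

theorem pvFoldA_progress (F : List (List String × List String)) :
    ∀ st : List String × Bool, st.1.Nodup →
      (F.foldl pvStepA st).1.Nodup ∧
      st.1.length ≤ (F.foldl pvStepA st).1.length ∧
      ((F.foldl pvStepA st).2 = true → st.2 = true ∨
        st.1.length < (F.foldl pvStepA st).1.length) := by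
  induction F with
  | nil => intro st h; exact ⟨h, le_refl _, fun h => Or.inl h⟩
  | cons dep F ih =>
    intro st h
    rw [List.foldl_cons]
    rcases pvStepA_cases st dep with ⟨heq, -⟩ | ⟨h1, h2, heq⟩
    · rw [heq]; exact ih st h
    · rw [heq]
      have hnd' : (PySem.Set.union st.1 dep.2).Nodup := PySem.Set.nodup_union _ _ h
      obtain ⟨k1, k2, k3⟩ := ih (PySem.Set.union st.1 dep.2, true) hnd'
      have hlt : st.1.length < (PySem.Set.union st.1 dep.2).length :=
        pvUnion_length_lt h2
      exact ⟨k1, le_of_lt (lt_of_lt_of_le hlt k2), fun _ =>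
        Or.inr (lt_of_lt_of_le hlt k2)⟩

theorem pvFoldA_false (F : List (List String × List String)) :
    ∀ st : List String × Bool, (F.foldl pvStepA st).2 = false →
      (F.foldl pvStepA st).1 = st.1 ∧ ∀ dep ∈ F, dep.1 ⊆ st.1 → dep.2 ⊆ st.1 := by
  induction F with
  | nil => intro st h; exact ⟨rfl, by simp⟩
  | cons dep F ih =>
    intro st h
    rw [List.foldl_cons] at h ⊢
    rcases pvStepA_cases st dep with ⟨heq, himp⟩ | ⟨h1, h2, heq⟩
    · rw [heq] at h ⊢
      obtain ⟨ha, hb⟩ := ih st h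
      refine ⟨ha, fun d hd => ?_⟩
      rcases List.mem_cons.mp hd with rfl | hd
      · exact himp
      · exact hb d hd
    · exfalso
      rw [heq] at h
      -- the flag, once true, stays true through the fold
      have hflag : ∀ (G : List (List String × List String)) (st' : List String × Bool),
          st'.2 = true → (G.foldl pvStepA st').2 = true := by
        intro G
        induction G with
        | nil => intro st' h'; exact h'
        | cons d G ihg =>
          intro st' h'
          rw [List.foldl_cons]
          rcases pvStepA_cases st' d with ⟨heq', -⟩ | ⟨-, -, heq'⟩
          · rw [heq']; exact ihg st' h'
          · rw [heq']; exact ihg _ rfl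
      rw [hflag F (PySem.Set.union st.1 dep.2, true) rfl] at h
      exact absurd h (by decide)

theorem pvFoldA_sound (F : List (List String × List String)) :
    ∀ (st : List String × Bool) (T : List String),
      (∀ dep ∈ F, dep.1 ⊆ T → dep.2 ⊆ T) → st.1 ⊆ T →
      (F.foldl pvStepA st).1 ⊆ T := by
  induction F with
  | nil => intro st T _ h; exact h
  | cons dep F ih =>
    intro st T hT h
    rw [List.foldl_cons]
    apply ih _ T (fun d hd => hT d (List.mem_cons_of_mem _ hd))
    rcases pvStepA_cases st dep with ⟨heq, -⟩ | ⟨h1, -, heq⟩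
    · rw [heq]; exact h
    · rw [heq]
      intro x hx
      rcases (PySem.Set.mem_union _ _ x).mp hx with hx | hx
      · exact h hx
      · exact hT dep List.mem_cons_self (fun y hy => h (h1 hy)) hx

theorem pvLoopA_spec (F : List (List String × List String)) (U : List String)
    (hU : ∀ dep ∈ F, dep.2 ⊆ U) :
    ∀ (fuel : Nat) (det : List String), det.Nodup → det ⊆ U →
      U.length + 1 ≤ fuel + det.length →
      det ⊆ pvLoopA F fuel det ∧ pvClosed F (pvLoopA F fuel det) := by
  intro fuel
  induction fuel with
  | zero =>
    intro det hnd hsub hfuel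
    exact absurd (pvNodupLenLe hnd hsub) (by omega)
  | succ fuel ih =>
    intro det hnd hsub hfuel
    simp only [pvLoopA, pvPassA]
    by_cases h2 : (List.foldl pvStepA (det, false) F).2
    · rw [if_pos h2]
      obtain ⟨k1, k2, k3⟩ := pvFoldA_progress F (det, false) hnd
      have hlt : det.length < (List.foldl pvStepA (det, false) F).1.length := by
        rcases k3 h2 with h | h
        · exact absurd h (by simp)
        · exact h
      have hsub' : (List.foldl pvStepA (det, false) F).1 ⊆ U :=
        pvFoldA_sound F (det, false) U (fun dep hdep _ => hU dep hdep) hsub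
      obtain ⟨m1, m2⟩ := ih (List.foldl pvStepA (det, false) F).1 k1 hsub' (by omega)
      exact ⟨List.Subset.trans (pvFoldA_mono F (det, false)) m1, m2⟩
    · rw [if_neg h2]
      obtain ⟨ha, hb⟩ := pvFoldA_false F (det, false) (Bool.not_eq_true _ ▸ h2)
      rw [ha]
      exact ⟨List.Subset.refl _, fun dep hdep => hb dep hdep⟩

theorem pvLoopA_sound (F : List (List String × List String)) (T : List String)
    (hT : pvClosed F T) :
    ∀ (fuel : Nat) (det : List String), det ⊆ T → pvLoopA F fuel det ⊆ T := by
  intro fuel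
  induction fuel with
  | zero => intro det h; exact h
  | succ fuel ih =>
    intro det h
    simp only [pvLoopA, pvPassA]
    have hstep : (List.foldl pvStepA (det, false) F).1 ⊆ T :=
      pvFoldA_sound F (det, false) T (fun dep hdep => hT dep hdep) h
    by_cases h2 : (List.foldl pvStepA (det, false) F).2
    · rw [if_pos h2]; exact ih _ hstep
    · rw [if_neg h2]; exact hstep

theorem pvGetClosure_spec (f : List String) (F : List (List String × List String))
    (hnd : f.Nodup) :
    f ⊆ pvGetClosure f F ∧ pvClosed F (pvGetClosure f F) ∧
    ∀ T, pvClosed F T → f ⊆ T → pvGetClosure f F ⊆ T := by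
  have hU : ∀ dep ∈ F, dep.2 ⊆
      PySem.Set.ofList (f ++ F.flatMap (fun d => d.2)) := by
    intro dep hdep x hx
    rw [PySem.Set.mem_ofList, List.mem_append]
    exact Or.inr (List.mem_flatMap.mpr ⟨dep, hdep, hx⟩)
  have hsub : f ⊆ PySem.Set.ofList (f ++ F.flatMap (fun d => d.2)) := by
    intro x hx
    rw [PySem.Set.mem_ofList, List.mem_append]
    exact Or.inl hx
  have hlen := PySem.Set.length_ofList_le (f ++ F.flatMap (fun d => d.2))
  rw [List.length_append] at hlen
  obtain ⟨h1, h2⟩ := pvLoopA_spec F _ hU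
    (f.length + (F.flatMap (fun d => d.2)).length + 1) f hnd hsub (by omega)
  exact ⟨h1, h2, fun T hT hfT => pvLoopA_sound F T hT _ f hfT⟩

-- ----- B side -----

theorem pvFireB_facts : ∀ (rhs : List String) (st : List String × List String),
    (∀ x, x ∈ (pvFireB st rhs).1 ↔ x ∈ st.1 ∨ x ∈ rhs) ∧
    (∀ x, x ∈ (pvFireB st rhs).2 ↔ x ∈ st.2 ∨ (x ∈ rhs ∧ x ∉ st.1)) ∧
    (st.1.Nodup → (pvFireB st rhs).1.Nodup) ∧
    ((pvFireB st rhs).1.length + st.2.length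
      = st.1.length + (pvFireB st rhs).2.length) ∧
    (st.1 = st.2 → (pvFireB st rhs).1 = (pvFireB st rhs).2) := by
  intro rhs
  induction rhs with
  | nil =>
    intro st
    refine ⟨fun x => by simp [pvFireB], fun x => by simp [pvFireB], fun h => h, by simp [pvFireB], fun h => h⟩
  | cons b rhs ih =>
    intro st
    have hstep : pvFireB st (b :: rhs) =
        pvFireB (if PySem.Set.contains st.1 b then st else (st.1 ++ [b], st.2 ++ [b])) rhs := rfl
    by_cases hb : b ∈ st.1
    · have hcb : PySem.Set.contains st.1 b = true := (PySem.Set.contains_iff st.1 b).mpr hb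
      rw [hstep, if_pos hcb]
      obtain ⟨i1, i2, i3, i4, i5⟩ := ih st
      refine ⟨fun x => ?_, fun x => ?_, i3, i4, i5⟩
      · rw [i1 x, List.mem_cons]
        constructor
        · rintro (h | h)
          · exact Or.inl h
          · exact Or.inr (Or.inr h)
        · rintro (h | rfl | h)
          · exact Or.inl h
          · exact Or.inl hb
          · exact Or.inr h
      · rw [i2 x, List.mem_cons]
        constructor
        · rintro (h | ⟨h1, h2⟩)
          · exact Or.inl h
          · exact Or.inr ⟨Or.inr h1, h2⟩
        · rintro (h | ⟨(rfl | h1), h2⟩)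
          · exact Or.inl h
          · exact absurd hb h2
          · exact Or.inr ⟨h1, h2⟩
    · have hcb : PySem.Set.contains st.1 b = false := by
        rw [← Bool.not_eq_true, PySem.Set.contains_iff]
        exact hb
      rw [hstep, if_neg (by rw [hcb]; exact Bool.false_ne_true)]
      obtain ⟨i1, i2, i3, i4, i5⟩ := ih (st.1 ++ [b], st.2 ++ [b])
      refine ⟨fun x => ?_, fun x => ?_, fun hnd => ?_, ?_, fun he => ?_⟩
      · rw [i1 x]
        simp only [List.mem_append, List.mem_cons]
        tauto
      · rw [i2 x]
        simp only [List.mem_append, List.mem_cons]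
        by_cases hxb : x = b <;> subst_eqs <;> tauto
      · apply i3
        refine List.Nodup.append hnd (List.nodup_singleton b) ?_
        intro x hx hxb
        rw [List.mem_singleton] at hxb
        subst hxb
        exact hb hx
      · have := i4
        simp only [List.length_append, List.length_singleton] at this ⊢
        omega
      · apply i5
        rw [he]

-- inner 'for lhs, rhs in index.get(a, ())' fold facts
theorem pvInnerB_mono : ∀ (js : List (List String × List String))
    (st : List String × List String),
    st.1 ⊆ (js.foldl pvInnerB st).1 ∧ st.2 ⊆ (js.foldl pvInnerB st).2 := by
  intro js
  induction js with
  | nil => intro st; exact ⟨List.Subset.refl _, List.Subset.refl _⟩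
  | cons dep js ih =>
    intro st
    rw [List.foldl_cons]
    obtain ⟨m1, m2⟩ := ih (pvInnerB st dep)
    have h1 : st.1 ⊆ (pvInnerB st dep).1 ∧ st.2 ⊆ (pvInnerB st dep).2 := by
      unfold pvInnerB
      split
      · obtain ⟨f1, f2, -, -, -⟩ := pvFireB_facts dep.2 st
        exact ⟨fun x hx => (f1 x).mpr (Or.inl hx), fun x hx => (f2 x).mpr (Or.inl hx)⟩
      · exact ⟨List.Subset.refl _, List.Subset.refl _⟩
    exact ⟨List.Subset.trans h1.1 m1, List.Subset.trans h1.2 m2⟩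

theorem pvInnerB_nodup : ∀ (js : List (List String × List String))
    (st : List String × List String),
    st.1.Nodup → (js.foldl pvInnerB st).1.Nodup := by
  intro js
  induction js with
  | nil => intro st h; exact h
  | cons dep js ih =>
    intro st h
    rw [List.foldl_cons]
    apply ih
    unfold pvInnerB
    split
    · exact (pvFireB_facts dep.2 st).2.2.1 h
    · exact h

theorem pvInnerB_count : ∀ (js : List (List String × List String))
    (st : List String × List String),
    (js.foldl pvInnerB st).1.length + st.2.length
      = st.1.length + (js.foldl pvInnerB st).2.length := by
  intro js
  induction js with
  | nil => intro st; simp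
  | cons dep js ih =>
    intro st
    rw [List.foldl_cons]
    have hstep : (pvInnerB st dep).1.length + st.2.length
        = st.1.length + (pvInnerB st dep).2.length := by
      unfold pvInnerB
      split
      · exact (pvFireB_facts dep.2 st).2.2.2.1
      · omega
    have := ih (pvInnerB st dep)
    omega

theorem pvInnerB_track : ∀ (js : List (List String × List String))
    (st : List String × List String) (r₀ : List String),
    (∀ x ∈ st.1, x ∈ r₀ ∨ x ∈ st.2) →
    ∀ x ∈ (js.foldl pvInnerB st).1, x ∈ r₀ ∨ x ∈ (js.foldl pvInnerB st).2 := by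
  intro js
  induction js with
  | nil => intro st r₀ h; exact h
  | cons dep js ih =>
    intro st r₀ h
    rw [List.foldl_cons]
    apply ih
    intro x hx
    unfold pvInnerB at hx ⊢
    split at hx
    · obtain ⟨f1, f2, -, -, -⟩ := pvFireB_facts dep.2 st
      split
      · rcases (f1 x).mp hx with hx1 | hx1
        · rcases h x hx1 with h' | h'
          · exact Or.inl h'
          · exact Or.inr ((f2 x).mpr (Or.inl h'))
        · by_cases hx2 : x ∈ st.1
          · rcases h x hx2 with h' | h'
            · exact Or.inl h'
            · exact Or.inr ((f2 x).mpr (Or.inl h'))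
          · exact Or.inr ((f2 x).mpr (Or.inr ⟨hx1, hx2⟩))
      · next hc => exact absurd ‹_› hc
    · split
      · next hc hc2 => exact absurd hc2 hc
      · exact h x hx

theorem pvInnerB_stacksub : ∀ (js : List (List String × List String))
    (st : List String × List String),
    st.2 ⊆ st.1 → (js.foldl pvInnerB st).2 ⊆ (js.foldl pvInnerB st).1 := by
  intro js
  induction js with
  | nil => intro st h; exact h
  | cons dep js ih =>
    intro st h
    rw [List.foldl_cons]
    apply ih
    unfold pvInnerB
    split
    · obtain ⟨f1, f2, -, -, -⟩ := pvFireB_facts dep.2 st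
      intro x hx
      rcases (f2 x).mp hx with hx | ⟨hx1, -⟩
      · exact (f1 x).mpr (Or.inl (h hx))
      · exact (f1 x).mpr (Or.inr hx1)
    · exact h

theorem pvInnerB_fired : ∀ (js : List (List String × List String))
    (st : List String × List String),
    ∀ dep ∈ js, dep.1 ⊆ st.1 → dep.2 ⊆ (js.foldl pvInnerB st).1 := by
  intro js
  induction js with
  | nil => intro st dep h; exact absurd h (List.not_mem_nil)
  | cons d js ih =>
    intro st dep hdep hsub
    rw [List.foldl_cons]
    rcases List.mem_cons.mp hdep with rfl | hdep
    · have hfire : pvInnerB st dep = pvFireB st dep.2 := by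
        unfold pvInnerB
        rw [if_pos ((PySem.Set.issubset_iff dep.1 st.1).mpr hsub)]
      intro y hy
      have : y ∈ (pvInnerB st dep).1 := by
        rw [hfire]
        exact ((pvFireB_facts dep.2 st).1 y).mpr (Or.inr hy)
      exact (pvInnerB_mono js _).1 this
    · apply ih _ dep hdep
      exact List.Subset.trans hsub
        (by
          unfold pvInnerB
          split
          · intro x hx
            exact ((pvFireB_facts d.2 st).1 x).mpr (Or.inl hx)
          · exact List.Subset.refl _)

theorem pvInnerB_sound : ∀ (js : List (List String × List String))
    (st : List String × List String) (T : List String),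
    (∀ dep ∈ js, dep.1 ⊆ T → dep.2 ⊆ T) → st.1 ⊆ T →
    (js.foldl pvInnerB st).1 ⊆ T := by
  intro js
  induction js with
  | nil => intro st T _ h; exact h
  | cons dep js ih =>
    intro st T hT h
    rw [List.foldl_cons]
    apply ih _ T (fun d hd => hT d (List.mem_cons_of_mem _ hd))
    unfold pvInnerB
    split
    · next hss =>
      intro x hx
      rcases ((pvFireB_facts dep.2 st).1 x).mp hx with hx | hx
      · exact h hx
      · refine hT dep List.mem_cons_self ?_ hx
        intro y hy
        exact h ((PySem.Set.issubset_iff dep.1 st.1).mp hss y hy)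
    · exact h

theorem pvInnerB_univ : ∀ (js : List (List String × List String))
    (st : List String × List String) (U : List String),
    (∀ dep ∈ js, dep.2 ⊆ U) → st.1 ⊆ U →
    (js.foldl pvInnerB st).1 ⊆ U := by
  intro js st U hU h
  exact pvInnerB_sound js st U (fun dep hdep _ => hU dep hdep) h

-- init 'for lhs, rhs in F: if not lhs' fold facts
theorem pvInitB_mono : ∀ (F : List (List String × List String))
    (st : List String × List String), st.1 ⊆ (F.foldl pvInitB st).1 := by
  intro F
  induction F with
  | nil => intro st; exact List.Subset.refl _
  | cons dep F ih =>
    intro st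
    rw [List.foldl_cons]
    refine List.Subset.trans ?_ (ih (pvInitB st dep))
    unfold pvInitB
    split
    · intro x hx
      exact ((pvFireB_facts dep.2 st).1 x).mpr (Or.inl hx)
    · exact List.Subset.refl _

theorem pvInitB_eq : ∀ (F : List (List String × List String))
    (st : List String × List String),
    st.1 = st.2 → (F.foldl pvInitB st).1 = (F.foldl pvInitB st).2 := by
  intro F
  induction F with
  | nil => intro st h; exact h
  | cons dep F ih =>
    intro st h
    rw [List.foldl_cons]
    apply ih
    unfold pvInitB
    split
    · exact (pvFireB_facts dep.2 st).2.2.2.2 h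
    · exact h

theorem pvInitB_nodup : ∀ (F : List (List String × List String))
    (st : List String × List String),
    st.1.Nodup → (F.foldl pvInitB st).1.Nodup := by
  intro F
  induction F with
  | nil => intro st h; exact h
  | cons dep F ih =>
    intro st h
    rw [List.foldl_cons]
    apply ih
    unfold pvInitB
    split
    · exact (pvFireB_facts dep.2 st).2.2.1 h
    · exact h

theorem pvInitB_empty : ∀ (F : List (List String × List String))
    (st : List String × List String),
    ∀ dep ∈ F, dep.1 = [] → dep.2 ⊆ (F.foldl pvInitB st).1 := by
  intro F
  induction F with
  | nil => intro st dep h; exact absurd h (List.not_mem_nil)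
  | cons d F ih =>
    intro st dep hdep hnil
    rw [List.foldl_cons]
    rcases List.mem_cons.mp hdep with rfl | hdep
    · have hfire : pvInitB st dep = pvFireB st dep.2 := by
        unfold pvInitB
        rw [if_pos (by rw [hnil]; rfl)]
      intro y hy
      apply pvInitB_mono F (pvInitB st dep)
      rw [hfire]
      exact ((pvFireB_facts dep.2 st).1 y).mpr (Or.inr hy)
    · exact ih _ dep hdep hnil

theorem pvInitB_sound : ∀ (F : List (List String × List String))
    (st : List String × List String) (T : List String),
    (∀ dep ∈ F, dep.1 ⊆ T → dep.2 ⊆ T) → st.1 ⊆ T →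
    (F.foldl pvInitB st).1 ⊆ T := by
  intro F
  induction F with
  | nil => intro st T _ h; exact h
  | cons dep F ih =>
    intro st T hT h
    rw [List.foldl_cons]
    apply ih _ T (fun d hd => hT d (List.mem_cons_of_mem _ hd))
    unfold pvInitB
    split
    · next hemp =>
      intro x hx
      rcases ((pvFireB_facts dep.2 st).1 x).mp hx with hx | hx
      · exact h hx
      · exact hT dep List.mem_cons_self
          (by rw [List.isEmpty_iff.mp hemp]; exact List.nil_subset _) hx
    · exact h

theorem pvInitB_univ : ∀ (F : List (List String × List String))
    (st : List String × List String) (U : List String),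
    (∀ dep ∈ F, dep.2 ⊆ U) → st.1 ⊆ U → (F.foldl pvInitB st).1 ⊆ U := by
  intro F st U hU h
  exact pvInitB_sound F st U (fun dep hdep _ => hU dep hdep) h

-- the attribute → FD index: what it stores
theorem pvIndexB_aux : ∀ (L : List String)
    (d : PySem.Dict String (List (List String × List String)))
    (dep x : List String × List String) (a : String),
    (x ∈ (L.foldl (fun d a => d.modify a [] (fun l => l ++ [dep])) d).getD a [] ↔
      x ∈ d.getD a [] ∨ (x = dep ∧ a ∈ L)) := by
  intro L
  induction L with
  | nil => intro d dep x a; simp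
  | cons b L ih =>
    intro d dep x a
    rw [List.foldl_cons, ih]
    rw [PySem.Dict.getD_modify]
    by_cases hab : a = b
    · subst hab
      rw [if_pos rfl]
      simp only [List.mem_append, List.mem_cons]
      tauto
    · rw [if_neg hab]
      simp only [List.mem_cons]
      constructor
      · rintro (h | ⟨rfl, h2⟩)
        · exact Or.inl h
        · exact Or.inr ⟨rfl, Or.inr h2⟩
      · rintro (h | ⟨rfl, (rfl | h2)⟩)
        · exact Or.inl h
        · exact absurd rfl hab
        · exact Or.inr ⟨rfl, h2⟩

theorem pvIndexB_mem : ∀ (F : List (List String × List String))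
    (a : String) (x : List String × List String),
    x ∈ (pvIndexB F).getD a [] ↔ x ∈ F ∧ a ∈ x.1 := by
  have main : ∀ (F : List (List String × List String))
      (d : PySem.Dict String (List (List String × List String)))
      (a : String) (x : List String × List String),
      x ∈ (F.foldl (fun d dep =>
        dep.1.foldl (fun d a => d.modify a [] (fun l => l ++ [dep])) d) d).getD a [] ↔
      x ∈ d.getD a [] ∨ (x ∈ F ∧ a ∈ x.1) := by
    intro F
    induction F with
    | nil => intro d a x; simp
    | cons dep F ih =>
      intro d a x
      rw [List.foldl_cons, ih, pvIndexB_aux]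
      simp only [List.mem_cons]
      constructor
      · rintro ((h | ⟨rfl, h2⟩) | ⟨h1, h2⟩)
        · exact Or.inl h
        · exact Or.inr ⟨Or.inl rfl, h2⟩
        · exact Or.inr ⟨Or.inr h1, h2⟩
      · rintro (h | ⟨(rfl | h1), h2⟩)
        · exact Or.inl (Or.inl h)
        · exact Or.inl (Or.inr ⟨rfl, h2⟩)
        · exact Or.inr ⟨h1, h2⟩
  intro F a x
  unfold pvIndexB
  rw [main]
  simp [PySem.Dict.getD_empty]

theorem pvLoopB_closed (F : List (List String × List String)) (U : List String)
    (hU : ∀ dep ∈ F, dep.2 ⊆ U) :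
    ∀ (fuel : Nat) (st : List String × List String),
      st.1.Nodup → st.2 ⊆ st.1 → st.1 ⊆ U →
      (∀ dep ∈ F, (∀ x ∈ dep.1, x ∈ st.1 ∧ x ∉ st.2) → dep.2 ⊆ st.1) →
      U.length + st.2.length + 1 ≤ fuel + st.1.length →
      st.1 ⊆ pvLoopB (pvIndexB F) fuel st ∧
        pvClosed F (pvLoopB (pvIndexB F) fuel st) := by
  intro fuel
  induction fuel with
  | zero =>
    intro st hnd hss hsU hI3 hfuel
    exact absurd (pvNodupLenLe hnd hsU) (by omega)
  | succ fuel ih =>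
    intro st hnd hss hsU hI3 hfuel
    cases hlast : st.2.getLast? with
    | none =>
      have hnil : st.2 = [] := List.getLast?_eq_none_iff.mp hlast
      simp only [pvLoopB, hlast]
      refine ⟨List.Subset.refl _, fun dep hdep hsub => ?_⟩
      exact hI3 dep hdep (fun x hx => ⟨hsub hx, by rw [hnil]; exact List.not_mem_nil⟩)
    | some a =>
      simp only [pvLoopB, hlast]
      have hamem2 : a ∈ st.2 := List.mem_of_getLast? hlast
      have hamem1 : a ∈ st.1 := hss hamem2
      have hsplit : st.2.dropLast ++ [a] = st.2 :=
        List.dropLast_append_getLast? a hlast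
      set js := (pvIndexB F).getD a [] with hjs
      set st' := js.foldl pvInnerB (st.1, st.2.dropLast) with hst'
      have hjsF : ∀ dep ∈ js, dep ∈ F ∧ a ∈ dep.1 :=
        fun dep hdep => (pvIndexB_mem F a dep).mp hdep
      have hmono : st.1 ⊆ st'.1 := (pvInnerB_mono js (st.1, st.2.dropLast)).1
      have hmono2 : st.2.dropLast ⊆ st'.2 := (pvInnerB_mono js (st.1, st.2.dropLast)).2
      have hnd' : st'.1.Nodup := pvInnerB_nodup js _ hnd
      have hss' : st'.2 ⊆ st'.1 := pvInnerB_stacksub js (st.1, st.2.dropLast)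
        (List.Subset.trans (List.dropLast_subset st.2) hss)
      have hsU' : st'.1 ⊆ U := pvInnerB_univ js _ U
        (fun dep hdep => hU dep (hjsF dep hdep).1) hsU
      have htrack : ∀ x ∈ st'.1, x ∈ st.1 ∨ x ∈ st'.2 :=
        pvInnerB_track js (st.1, st.2.dropLast) st.1 (fun x hx => Or.inl hx)
      have hI3' : ∀ dep ∈ F, (∀ x ∈ dep.1, x ∈ st'.1 ∧ x ∉ st'.2) → dep.2 ⊆ st'.1 := by
        intro dep hdep hx
        have hxr : ∀ x ∈ dep.1, x ∈ st.1 := by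
          intro x hxm
          rcases htrack x (hx x hxm).1 with h | h
          · exact h
          · exact absurd h (hx x hxm).2
        by_cases hain : a ∈ dep.1
        · exact pvInnerB_fired js (st.1, st.2.dropLast) dep
            ((pvIndexB_mem F a dep).mpr ⟨hdep, hain⟩) hxr
        · have hnotold : ∀ x ∈ dep.1, x ∉ st.2 := by
            intro x hxm hxs
            rw [← hsplit, List.mem_append, List.mem_singleton] at hxs
            rcases hxs with hxs | rfl
            · exact (hx x hxm).2 (hmono2 hxs)
            · exact hain hxm
          exact List.Subset.trans
            (hI3 dep hdep (fun x hxm => ⟨hxr x hxm, hnotold x hxm⟩)) hmono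
      have hcount : st'.1.length + st.2.dropLast.length
          = st.1.length + st'.2.length := pvInnerB_count js (st.1, st.2.dropLast)
      have hlen2 : st.2.dropLast.length + 1 = st.2.length := by
        have : st.2 ≠ [] := fun h => by rw [h] at hamem2; exact List.not_mem_nil hamem2
        have := List.length_dropLast (xs := st.2)
        have hpos : 0 < st.2.length := List.length_pos_of_mem hamem2
        omega
      obtain ⟨m1, m2⟩ := ih st' hnd' hss' hsU' hI3' (by omega)
      exact ⟨List.Subset.trans hmono m1, m2⟩

theorem pvLoopB_sound (F : List (List String × List String)) (T : List String)
    (hT : pvClosed F T) :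
    ∀ (fuel : Nat) (st : List String × List String),
      st.1 ⊆ T → pvLoopB (pvIndexB F) fuel st ⊆ T := by
  intro fuel
  induction fuel with
  | zero => intro st h; exact h
  | succ fuel ih =>
    intro st h
    cases hlast : st.2.getLast? with
    | none => simp only [pvLoopB, hlast]; exact h
    | some a =>
      simp only [pvLoopB, hlast]
      apply ih
      exact pvInnerB_sound _ _ T
        (fun dep hdep => hT dep ((pvIndexB_mem F a dep).mp hdep).1) h

theorem pvClosureB_spec (seed : List String) (F : List (List String × List String)) :
    seed ⊆ pvClosureB seed F (pvIndexB F) ∧ pvClosed F (pvClosureB seed F (pvIndexB F)) ∧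
    ∀ T, pvClosed F T → seed ⊆ T → pvClosureB seed F (pvIndexB F) ⊆ T := by
  have hU : ∀ dep ∈ F, dep.2 ⊆
      PySem.Set.ofList (seed ++ F.flatMap (fun d => d.2)) := by
    intro dep hdep x hx
    rw [PySem.Set.mem_ofList, List.mem_append]
    exact Or.inr (List.mem_flatMap.mpr ⟨dep, hdep, hx⟩)
  set U := PySem.Set.ofList (seed ++ F.flatMap (fun d => d.2)) with hUdef
  set r0 : PySem.Set String := PySem.Set.ofList seed with hr0
  set st0 := F.foldl pvInitB (r0, r0) with hst0
  have heq0 : st0.1 = st0.2 := pvInitB_eq F (r0, r0) rfl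
  have hnd0 : st0.1.Nodup := pvInitB_nodup F (r0, r0) (PySem.Set.nodup_ofList seed)
  have hmono0 : r0 ⊆ st0.1 := pvInitB_mono F (r0, r0)
  have hsU0 : st0.1 ⊆ U := pvInitB_univ F (r0, r0) U hU
    (by
      intro x hx
      rw [hr0, PySem.Set.mem_ofList] at hx
      rw [hUdef, PySem.Set.mem_ofList, List.mem_append]
      exact Or.inl hx)
  have hI3 : ∀ dep ∈ F, (∀ x ∈ dep.1, x ∈ st0.1 ∧ x ∉ st0.2) → dep.2 ⊆ st0.1 := by
    intro dep hdep hx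
    cases hd1 : dep.1 with
    | nil => exact pvInitB_empty F (r0, r0) dep hdep hd1
    | cons y L =>
      exfalso
      have := hx y (by rw [hd1]; exact List.mem_cons_self)
      rw [← heq0] at this
      exact this.2 this.1
  have hlenU : U.length ≤ seed.length + (F.flatMap (fun d => d.2)).length := by
    have := PySem.Set.length_ofList_le (seed ++ F.flatMap (fun d => d.2))
    rw [List.length_append] at this
    exact this
  have hfuel : U.length + st0.2.length + 1 ≤
      (seed.length + (F.flatMap (fun d => d.2)).length + 1) + st0.1.length := by
    rw [← heq0]
    omega
  obtain ⟨m1, m2⟩ := pvLoopB_closed F U hU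
    (seed.length + (F.flatMap (fun d => d.2)).length + 1) st0
    hnd0 (by rw [heq0]; exact List.Subset.refl _) hsU0 hI3 hfuel
  refine ⟨?_, ?_, ?_⟩
  · show seed ⊆ pvClosureB seed F (pvIndexB F)
    simp only [pvClosureB]
    intro x hx
    exact m1 (hmono0 ((PySem.Set.mem_ofList seed x).mpr hx))
  · show pvClosed F (pvClosureB seed F (pvIndexB F))
    simp only [pvClosureB]
    exact m2
  · intro T hT hseed
    show pvClosureB seed F (pvIndexB F) ⊆ T
    simp only [pvClosureB]
    apply pvLoopB_sound F T hT
    apply pvInitB_sound F (r0, r0) T (fun dep hdep => hT dep hdep)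
    intro x hx
    rw [hr0, PySem.Set.mem_ofList] at hx
    exact hseed hx

-- both closures have the same members
theorem pvClosure_mem_iff (s : List String) (F : List (List String × List String))
    (hnd : s.Nodup) :
    ∀ x, x ∈ pvGetClosure s F ↔ x ∈ pvClosureB s F (pvIndexB F) := by
  obtain ⟨a1, a2, a3⟩ := pvGetClosure_spec s F hnd
  obtain ⟨b1, b2, b3⟩ := pvClosureB_spec s F
  intro x
  exact ⟨fun h => a3 _ b2 b1 h, fun h => b3 _ a2 a1 h⟩

-- set equality only depends on membership
theorem pvEqual_congr {s s' t t' : List String}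
    (hs : ∀ x, x ∈ s ↔ x ∈ s') (ht : ∀ x, x ∈ t ↔ x ∈ t') :
    PySem.Set.equal s t = PySem.Set.equal s' t' := by
  rw [Bool.eq_iff_iff, PySem.Set.equal_iff, PySem.Set.equal_iff]
  constructor
  · intro h x
    rw [← hs, ← ht]
    exact h x
  · intro h x
    rw [hs, ht]
    exact h x

-- 'violation' fold: once False, stays False
theorem pvFoldFalse (c : List String → Bool) :
    ∀ (l : List (List String)) (v : Bool),
      l.foldl (fun v k => if c k then false else v) v = (v && !(l.any c)) := by
  intro l
  induction l with
  | nil => intro v; simp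
  | cons k l ih =>
    intro v
    rw [List.foldl_cons, ih]
    by_cases h : c k <;> simp [h]

theorem pvCheckA_eq_all (keys : List (List String)) :
    ∀ F, pvCheckA keys F = F.all (fun dep => keys.any (fun k =>
      PySem.Set.issubset k dep.1 || PySem.Set.issubset dep.2 k)) := by
  intro F
  induction F with
  | nil => rfl
  | cons f rest ih =>
    simp only [pvCheckA]
    rw [pvFoldFalse (fun k => PySem.Set.issubset k f.1 || PySem.Set.issubset f.2 k)
      keys true, ih]
    by_cases h : keys.any (fun k =>
        PySem.Set.issubset k f.1 || PySem.Set.issubset f.2 k) <;>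
      simp [h, List.all_cons]

theorem pvLenFilter (l : List (List String)) (c : List String → Bool) :
    (((l.filter c).length == 0) : Bool) = !(l.any c) := by
  rw [Bool.eq_iff_iff]
  simp only [beq_iff_eq, List.length_eq_zero_iff, List.filter_eq_nil_iff,
    Bool.not_eq_true', List.any_eq_false]

-- ===== VERDICT (by name: the statement is the Claim_ definition above) =====
theorem valid3nf_spec : Claim_equal_valid3nf := by
  unfold Claim_equal_valid3nf
  intro R F _
  unfold Spec_valid3nf
  show valid3nf R F = valid3nf_alt R F
  unfold valid3nf valid3nf_alt pvGetKeys pvPowerset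
  simp only []
  rw [PySem.List.foldl_append_if
    (fun ss => PySem.Set.equal R (pvGetClosure (PySem.Set.ofList ss) F))
    (fun ss => PySem.Set.ofList ss), List.nil_append]
  rw [List.filter_congr (fun ss _ =>
    pvEqual_congr (s := R) (s' := PySem.Set.ofList R)
      (t := pvGetClosure (PySem.Set.ofList ss) F)
      (t' := pvClosureB (PySem.Set.ofList ss) F (pvIndexB F))
      (fun x => (PySem.Set.mem_ofList R x).symm)
      (pvClosure_mem_iff (PySem.Set.ofList ss) F (PySem.Set.nodup_ofList ss)))]
  set SK := (((PySem.List.pyRange 1 (((1 <<< R.length : Nat) : Int) - 1) 1).map (fun i =>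
    ((((List.range R.length).map (fun i => ((1 <<< i : Nat) : Int))).zip R).filter
      (fun p => PySem.Int.band i p.1 != 0)).map (fun p => p.2))).filter
    (fun ss => PySem.Set.equal (PySem.Set.ofList R)
      (pvClosureB (PySem.Set.ofList ss) F (pvIndexB F)))).map
    (fun ss => PySem.Set.ofList ss) with hSK
  rw [PySem.List.foldl_append_if
    (fun sk => ((SK.filter (fun k =>
      PySem.Set.issubset k sk && !(PySem.Set.equal k sk))).length == 0))
    (fun sk => sk), List.nil_append, List.map_id']
  rw [List.filter_congr (fun sk _ => pvLenFilter SK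
    (fun k => PySem.Set.issubset k sk && !(PySem.Set.equal k sk)))]
  rw [pvCheckA_eq_all]
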